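-- pv_equiv track=rewrite | github.com/testpoo/tklunar | lunardata.py | pre_next
-- ===== SOURCE A (Python) =====
-- import itertools
--
-- def pre_next(lists):
--     listden = [len(list(v)) for k,v in itertools.groupby(lists)]
--     if lists[0] == 0 and lists[-1] == 0:
--         dspre = listden[0]
--         dsnext = listden[-1]
--     elif lists[0] == 0 and lists[-1] != 0:
--         dspre = listden[0]
--         dsnext = 0
--     elif lists[0] != 0 and lists[-1] == 0:
--         dspre = 0
--         dsnext = listden[-1]
--     else:
--         dspre = 0
--         dsnext = 0
--     return dspre,dsnext
-- ===== SOURCE B (Python) =====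
-- def pre_next(lists):
--     # return-value equivalent to A on non-empty lists; two direct scans, no group list
--     dspre = 0
--     for x in lists:
--         if x != 0:
--             break
--         dspre += 1
--     dsnext = 0
--     for x in reversed(lists):
--         if x != 0:
--             break
--         dsnext += 1
--     return dspre, dsnext
-- ===== Notes on version B (the rewrite author's own statement) =====
-- stated objective: faster
-- what changed: Replaces the itertools.groupby run-length list and the four-way branch with two direct scans that count leading zeros from the front and from the back and stop at the first nonzero element.
import Mathlib
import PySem

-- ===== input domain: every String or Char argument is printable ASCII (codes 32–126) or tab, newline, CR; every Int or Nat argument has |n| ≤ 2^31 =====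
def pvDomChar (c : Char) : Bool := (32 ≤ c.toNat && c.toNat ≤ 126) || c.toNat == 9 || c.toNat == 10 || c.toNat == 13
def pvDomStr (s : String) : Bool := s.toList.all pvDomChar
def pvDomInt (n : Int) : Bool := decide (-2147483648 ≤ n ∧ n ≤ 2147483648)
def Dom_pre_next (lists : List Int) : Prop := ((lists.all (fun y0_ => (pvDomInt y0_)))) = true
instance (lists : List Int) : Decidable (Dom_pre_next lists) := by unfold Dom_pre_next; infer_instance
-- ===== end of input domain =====

-- B replaces A's groupby run-length list + four-way branch with two direct early-exiting zero-count scans (measured faster).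


-- ===== PORT A =====
-- run lengths of itertools.groupby: current value v, current count n
def groupRun (v : Int) (n : Int) : List Int → List Int
  | [] => [n]
  | x :: xs => if x = v then groupRun v (n + 1) xs else n :: groupRun x 1 xs

def groupLens : List Int → List Int
  | [] => []
  | x :: xs => groupRun x 1 xs

def pre_next (lists : List Int) : Int × Int :=
  let listden := groupLens lists
  match PySem.List.pyGet? lists 0, PySem.List.pyGet? lists (-1) with
  | some h, some t =>
    if h = 0 ∧ t = 0 then
      ((PySem.List.pyGet? listden 0).getD 0, (PySem.List.pyGet? listden (-1)).getD 0)
    else if h = 0 ∧ t ≠ 0 then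
      ((PySem.List.pyGet? listden 0).getD 0, 0)
    else if h ≠ 0 ∧ t = 0 then
      (0, (PySem.List.pyGet? listden (-1)).getD 0)
    else (0, 0)
  | _, _ => (0, 0)   -- unreachable under Pre_: Python raises IndexError on []

-- ===== PORT B =====
-- count of leading zeros (the forward scan; the backward scan is the same on the reversed list)
def leadZeros : List Int → Int
  | [] => 0
  | x :: xs => if x ≠ 0 then 0 else 1 + leadZeros xs

def pre_next_alt (lists : List Int) : Int × Int :=
  (leadZeros lists, leadZeros lists.reverse)

-- ===== PRECONDITION & SPEC =====
-- Pre_ excludes only the empty list, on which A raises IndexError at its first subscript.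
def Pre_pre_next (lists : List Int) : Prop := lists ≠ []
instance (lists : List Int) : Decidable (Pre_pre_next lists) := by unfold Pre_pre_next; infer_instance
def pvWitness_pre_next : List Int := [0, 3, 0]

def Spec_pre_next (lists : List Int) (out : Int × Int) : Prop := out = pre_next_alt lists
instance (lists : List Int) (out : Int × Int) : Decidable (Spec_pre_next lists out) := by unfold Spec_pre_next; infer_instance

-- ===== CLAIM (what is proved, stated in full; the proofs are below) =====
def Claim_equal_pre_next : Prop := ∀ (lists : List Int), Dom_pre_next lists → Pre_pre_next lists → Spec_pre_next lists (pre_next lists)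

-- ===== LEMMAS AND PROOFS =====

-- leading count of elements equal to v
def leadEq (v : Int) : List Int → Int
  | [] => 0
  | x :: xs => if x = v then 1 + leadEq v xs else 0

-- last run length, following groupRun's recursion
def tcount (v : Int) (n : Int) : List Int → Int
  | [] => n
  | x :: xs => if x = v then tcount v (n + 1) xs else tcount x 1 xs

theorem leadEq_zero (xs : List Int) : leadEq 0 xs = leadZeros xs := by
  induction xs with
  | nil => rfl
  | cons x xs ih =>
    simp only [leadEq, leadZeros, ih]
    by_cases h : x = 0 <;> simp [h]

theorem groupRun_head (xs : List Int) (v n : Int) :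
    (groupRun v n xs).head? = some (n + leadEq v xs) := by
  induction xs generalizing v n with
  | nil => simp [groupRun, leadEq]
  | cons x xs ih =>
    simp only [groupRun, leadEq]
    by_cases h : x = v
    · simp [h, ih]; ring
    · simp [h]

theorem groupRun_getLast (xs : List Int) (v n : Int) :
    (groupRun v n xs).getLast? = some (tcount v n xs) := by
  induction xs generalizing v n with
  | nil => simp [groupRun, tcount]
  | cons x xs ih =>
    simp only [groupRun, tcount]
    by_cases h : x = v
    · simp [h, ih]
    · rw [if_neg h, if_neg h, List.getLast?_cons, ih]
      simp

theorem leadZeros_append (L M : List Int) :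
    leadZeros (L ++ M) = if L.all (· = 0) then (L.length : Int) + leadZeros M else leadZeros L := by
  induction L with
  | nil => simp
  | cons x xs ih =>
    simp only [List.cons_append, leadZeros, List.all_cons, ih]
    by_cases h : x = 0
    · simp [h]
      split <;> [push_cast; skip] <;> ring_nf
    · simp [h]

theorem leadZeros_all_zero (L : List Int) (h : L.all (· = 0)) : leadZeros L = L.length := by
  have := leadZeros_append L []
  simpa [h] using this

theorem leadZeros_replicate_zero (k : Nat) : leadZeros (List.replicate k 0) = k := by
  have := leadZeros_all_zero (List.replicate k 0) (by simp)
  simpa using this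

-- tcount (the last run length of replicate (m+1) v ++ xs) equals the trailing-zero count when the last element is 0
theorem tcount_eq_leadZeros_reverse (xs : List Int) (v : Int) (m : Nat)
    (h : xs.getLastD v = 0) :
    tcount v (m + 1) xs = leadZeros ((List.replicate (m + 1) v ++ xs).reverse) := by
  induction xs generalizing v m with
  | nil =>
    simp only [List.getLastD] at h
    simp [tcount, h, List.reverse_replicate, leadZeros_replicate_zero]
  | cons x xs ih =>
    simp only [tcount]
    by_cases hx : x = v
    · subst hx
      have h' : xs.getLastD x = 0 := by
        cases xs with
        | nil => simpa using h
        | cons y ys => simpa [List.getLastD] using h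
      have := ih x (m + 1) h'
      have hrep : List.replicate (m + 1 + 1) x ++ xs = List.replicate (m + 1) x ++ x :: xs := by
        rw [List.replicate_succ']
        simp
      rw [if_pos rfl]
      have hx2 := ih x (m + 1) h'
      rw [hrep] at hx2
      push_cast at hx2 ⊢
      exact hx2
    · rw [if_neg hx]
      have h' : xs.getLastD x = 0 := by
        cases xs with
        | nil => simpa [List.getLastD] using h
        | cons y ys => simpa [List.getLastD] using h
      have hbase : tcount x 1 xs = leadZeros ((List.replicate 1 x ++ xs).reverse) := by
        have := ih x 0 h'
        simpa using this
      rw [hbase]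
      -- both sides: leadZeros ((x :: xs).reverse ++ replicate (m+1) v) vs leadZeros ((x::xs).reverse)
      have hL : (List.replicate (m + 1) v ++ x :: xs).reverse
          = (x :: xs).reverse ++ List.replicate (m + 1) v := by
        simp [List.reverse_append, List.reverse_replicate]
      rw [hL]
      have hR : (List.replicate 1 x ++ xs).reverse = (x :: xs).reverse := by simp
      rw [hR]
      rw [leadZeros_append]
      split
      · rename_i hall
        -- all of (x :: xs) are zero, so x = 0 hence v ≠ 0, so the replicate adds nothing
        have hx0 : x = 0 := by
          have : x ∈ (x :: xs).reverse := by simp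
          have := List.all_eq_true.mp hall _ this
          simpa using this
        have hv : v ≠ 0 := fun hv0 => hx (hx0.trans hv0.symm)
        have hrep0 : leadZeros (List.replicate (m + 1) v) = 0 := by
          cases m with
          | zero => simp [leadZeros, hv]
          | succ k => simp [List.replicate_succ, leadZeros, hv]
        rw [hrep0, leadZeros_all_zero _ hall]
        simp
      · rfl

theorem leadZeros_reverse_of_last_ne (l : List Int) (a : Int) (hl : l.getLast? = some a)
    (ha : a ≠ 0) : leadZeros l.reverse = 0 := by
  have : l.reverse.head? = some a := by rw [List.head?_reverse, hl]
  cases hr : l.reverse with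
  | nil => simp [hr] at this
  | cons y ys =>
    rw [hr] at this
    simp at this
    simp [leadZeros, this, ha]

-- main pointwise lemma
theorem pre_next_eq (x : Int) (xs : List Int) :
    pre_next (x :: xs) = pre_next_alt (x :: xs) := by
  have hget0 : PySem.List.pyGet? (x :: xs) 0 = some x := by
    simp
  have hgetLast : PySem.List.pyGet? (x :: xs) (-1) = (x :: xs).getLast? := PySem.List.pyGet?_neg_one _
  obtain ⟨t, ht⟩ : ∃ t, (x :: xs).getLast? = some t := by
    cases h : (x :: xs).getLast? with
    | none => simp at h
    | some t => exact ⟨t, rfl⟩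
  have hden : groupLens (x :: xs) = groupRun x 1 xs := rfl
  have hhead : (groupRun x 1 xs).head? = some (1 + leadEq x xs) := groupRun_head xs x 1
  have hlast : (groupRun x 1 xs).getLast? = some (tcount x 1 xs) := groupRun_getLast xs x 1
  have hpg0 : PySem.List.pyGet? (groupRun x 1 xs) 0 = some (1 + leadEq x xs) := by
    rw [PySem.List.pyGet?_zero, ← List.head?_eq_getElem?, hhead]
  have hpgl : PySem.List.pyGet? (groupRun x 1 xs) (-1) = some (tcount x 1 xs) := by
    rw [PySem.List.pyGet?_neg_one, hlast]
  unfold pre_next pre_next_alt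
  rw [hget0, hgetLast, ht]
  simp only [hden, hpg0, hpgl, Option.getD_some]
  by_cases hx : x = 0 <;> by_cases htz : t = 0
  · -- head 0, last 0
    rw [if_pos ⟨hx, htz⟩]
    subst hx
    rw [Prod.mk.injEq]
    refine ⟨?_, ?_⟩
    · -- first component: 1 + leadEq 0 xs = leadZeros (0 :: xs)
      show 1 + leadEq 0 xs = leadZeros (0 :: xs)
      simp [leadZeros, leadEq_zero]
    · show tcount 0 1 xs = leadZeros (0 :: xs).reverse
      have hlastd : xs.getLastD 0 = 0 := by
        subst htz
        cases xs with
        | nil => simp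
        | cons y ys =>
          have := ht
          simpa [List.getLastD_eq_getLast?, List.getLast?_cons] using this
      have := tcount_eq_leadZeros_reverse xs 0 0 hlastd
      simpa using this
  · rw [if_neg (by simp [htz]), if_pos ⟨hx, htz⟩]
    subst hx
    rw [Prod.mk.injEq]
    refine ⟨?_, ?_⟩
    · show 1 + leadEq 0 xs = leadZeros (0 :: xs)
      simp [leadZeros, leadEq_zero]
    · show (0 : Int) = leadZeros (0 :: xs).reverse
      exact (leadZeros_reverse_of_last_ne _ t ht htz).symm
  · rw [if_neg (by simp [hx]), if_neg (by simp [hx]), if_pos ⟨hx, htz⟩]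
    rw [Prod.mk.injEq]
    refine ⟨?_, ?_⟩
    · show (0 : Int) = leadZeros (x :: xs)
      simp [leadZeros, hx]
    · show tcount x 1 xs = leadZeros (x :: xs).reverse
      have hlastd : xs.getLastD x = 0 := by
        subst htz
        cases xs with
        | nil =>
          simp at ht
          simp [ht]
        | cons y ys =>
          simpa [List.getLastD_eq_getLast?, List.getLast?_cons] using ht
      have := tcount_eq_leadZeros_reverse xs x 0 hlastd
      simpa using this
  · rw [if_neg (by simp [htz]), if_neg (by simp [hx]), if_neg (by simp [hx, htz])]
    rw [Prod.mk.injEq]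
    refine ⟨?_, ?_⟩
    · show (0 : Int) = leadZeros (x :: xs)
      simp [leadZeros, hx]
    · show (0 : Int) = leadZeros (x :: xs).reverse
      exact (leadZeros_reverse_of_last_ne _ t ht htz).symm

-- ===== VERDICT (by name: the statement is the Claim_ definition above) =====
theorem pre_next_spec : Claim_equal_pre_next := by
  intro lists _ hpre
  cases lists with
  | nil => exact absurd rfl hpre
  | cons x xs => exact pre_next_eq x xs
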